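-- pv_equiv track=rewrite | github.com/picasso653/codesignal_-codes | Interview Prep/new_order.py | solution
-- ===== SOURCE A (Python) =====
-- def solution(numbers):
--     new_order =[]
--     mid = len(numbers) // 2
--     if len(numbers) % 2 == 1:
--         left = mid - 1
--         right = mid + 1
--         new_order.append(numbers[mid])
--     else:
--         left = mid - 1
--         right = mid
--     while left >= 0 and right <= len(numbers):
--         p = numbers[left] * numbers[right]
--         new_order.append(p)
--         left -= 1
--         right += 1
--     return new_order
--     pass
-- ===== SOURCE B (Python) =====
-- def solution(numbers):
--     out = []
--     while len(numbers) > 1: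
--         out.append(numbers[0] * numbers[-1])
--         numbers = numbers[1:-1]
--     out.reverse()
--     return list(numbers) + out
-- ===== Notes on version B (the rewrite author's own statement) =====
-- stated objective: simpler
-- what changed: Replaces the center-outward two-pointer index loop by peeling the outermost pair off a shrinking slice, collecting products outside-in back-to-front and reversing once at the end; what is left of the list (the bare middle element or nothing) is prepended.
import Mathlib
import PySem

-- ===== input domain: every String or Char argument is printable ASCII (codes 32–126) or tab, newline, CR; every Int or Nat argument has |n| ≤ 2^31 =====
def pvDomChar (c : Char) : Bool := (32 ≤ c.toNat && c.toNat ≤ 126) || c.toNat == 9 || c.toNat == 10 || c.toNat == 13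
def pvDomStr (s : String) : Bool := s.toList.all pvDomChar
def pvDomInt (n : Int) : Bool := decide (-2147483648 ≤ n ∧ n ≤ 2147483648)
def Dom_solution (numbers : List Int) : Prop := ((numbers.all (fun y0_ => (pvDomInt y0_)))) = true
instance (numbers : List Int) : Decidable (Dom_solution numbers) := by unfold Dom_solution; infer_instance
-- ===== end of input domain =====

-- B replaces A's center-outward two-pointer while loop by structural recursion peeling the
-- outermost pair and recursing on the interior slice; objective: simpler. A is total, no Pre_.

-- ===== PORT A =====
-- the while loop: while left >= 0 and right <= len(numbers): append numbers[left]*numbers[right]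
-- (the 'none' match arms are Python's IndexError; unreachable here since left+right = len-1 throughout)
def solLoopA (numbers : List Int) (left right : Int) (acc : List Int) : List Int :=
  if _h : 0 ≤ left ∧ right ≤ (numbers.length : Int) then
    match PySem.List.pyGet? numbers left, PySem.List.pyGet? numbers right with
    | some a, some b => solLoopA numbers (left - 1) (right + 1) (acc ++ [a * b])
    | _, _ => acc
  else acc
termination_by (left + 1).toNat
decreasing_by omega

def solution (numbers : List Int) : List Int :=
  let mid := PySem.Int.floordiv (numbers.length : Int) 2
  if PySem.Int.mod (numbers.length : Int) 2 == 1 then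
    match PySem.List.pyGet? numbers mid with
    | some m => solLoopA numbers (mid - 1) (mid + 1) [m]
    | none => []   -- unreachable: odd length puts mid in range
  else
    solLoopA numbers (mid - 1) mid []

-- ===== PORT B =====
-- the while loop: while len(numbers) > 1: append numbers[0]*numbers[-1]; numbers = numbers[1:-1]
-- (the 'none' arms are Python's IndexError; unreachable since the loop runs only with length ≥ 2)
def solPeelB (numbers : List Int) (out : List Int) : List Int × List Int :=
  if 1 < numbers.length then
    match PySem.List.pyGet? numbers 0, PySem.List.pyGet? numbers (-1) with
    | some a, some b => solPeelB (PySem.List.slice numbers (some 1) (some (-1))) (out ++ [a * b])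
    | _, _ => (numbers, out)
  else (numbers, out)
termination_by numbers.length
decreasing_by
  simp only [PySem.List.length_slice, PySem.List.clampIdx_neg_one]
  have := PySem.List.clampIdx_le numbers.length 1
  omega

def solution_alt (numbers : List Int) : List Int :=
  let (rest, out) := solPeelB numbers []
  rest ++ out.reverse

-- ===== PRECONDITION & SPEC =====
def Spec_solution (numbers : List Int) (out : List Int) : Prop := out = solution_alt numbers
instance (numbers : List Int) (out : List Int) : Decidable (Spec_solution numbers out) := by unfold Spec_solution; infer_instance

-- ===== CLAIM (what is proved, stated in full; the proofs are below) =====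
def Claim_equal_solution : Prop := ∀ (numbers : List Int), Dom_solution numbers → Spec_solution numbers (solution numbers)

-- ===== LEMMAS AND PROOFS =====

/-- Common closed form both programs compute: the bare middle element (odd length) followed by
    the products of the reversed first half zipped with the second half, innermost first. -/
def solCore (xs : List Int) : List Int :=
  (if xs.length % 2 = 1 then [xs.getD (xs.length / 2) 0] else []) ++
    List.zipWith (· * ·) ((xs.take (xs.length / 2)).reverse) (xs.drop (xs.length - xs.length / 2))

/-- A's loop, entered with left = k-1 and right = len-k (its invariant left+right = len-1),
    produces the zip of the reversed k-prefix with the final k-suffix. -/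
lemma solLoopA_eq_zip (xs : List Int) (k : Nat) (acc : List Int) (hk : k ≤ xs.length) :
    solLoopA xs ((k : Int) - 1) ((xs.length : Int) - k) acc
      = acc ++ List.zipWith (· * ·) ((xs.take k).reverse) (xs.drop (xs.length - k)) := by
  induction k generalizing acc with
  | zero =>
    rw [solLoopA]
    simp
  | succ k ih =>
    rw [solLoopA]
    have hcond : 0 ≤ ((k + 1 : Nat) : Int) - 1 ∧
        (xs.length : Int) - (k + 1 : Nat) ≤ (xs.length : Int) := by
      push_cast; constructor <;> omega
    rw [dif_pos hcond]
    have hL : ((k + 1 : Nat) : Int) - 1 = ((k : Nat) : Int) := by push_cast; ring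
    have hlt : k < xs.length := by omega
    have hRidx : ((xs.length : Int) - (k + 1 : Nat)) = ((xs.length - (k + 1) : Nat) : Int) := by
      push_cast; omega
    have hgL : PySem.List.pyGet? xs (((k + 1 : Nat) : Int) - 1) = some xs[k] := by
      rw [hL, PySem.List.pyGet?_natCast, List.getElem?_eq_getElem hlt]
    have hlt2 : xs.length - (k + 1) < xs.length := by omega
    have hgR : PySem.List.pyGet? xs ((xs.length : Int) - (k + 1 : Nat))
        = some xs[xs.length - (k + 1)] := by
      rw [hRidx, PySem.List.pyGet?_natCast, List.getElem?_eq_getElem hlt2]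
    have harg1 : (((k + 1 : Nat) : Int) - 1) - 1 = ((k : Nat) : Int) - 1 := by push_cast; ring
    have harg2 : ((xs.length : Int) - (k + 1 : Nat)) + 1 = (xs.length : Int) - (k : Nat) := by
      push_cast; ring
    rw [hgL, hgR, harg1, harg2]
    dsimp only
    rw [ih _ (by omega)]
    have htake : xs.take (k + 1) = xs.take k ++ [xs[k]] := by
      rw [List.take_add_one, List.getElem?_eq_getElem hlt]; rfl
    have hdrop : xs.drop (xs.length - (k + 1))
        = xs[xs.length - (k + 1)] :: xs.drop (xs.length - k) := by
      rw [List.drop_eq_getElem_cons hlt2,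
        show xs.length - (k + 1) + 1 = xs.length - k from by omega]
    rw [htake, hdrop, List.reverse_append]
    simp [List.zipWith_cons_cons, List.append_assoc]

/-- A computes the closed form. -/
lemma solution_eq_core (numbers : List Int) : solution numbers = solCore numbers := by
  have hfd : PySem.Int.floordiv (numbers.length : Int) 2 = ((numbers.length / 2 : Nat) : Int) := by
    exact_mod_cast PySem.Int.floordiv_natCast numbers.length 2
  have hmod : PySem.Int.mod (numbers.length : Int) 2 = ((numbers.length % 2 : Nat) : Int) := by
    exact_mod_cast PySem.Int.mod_natCast numbers.length 2
  unfold solution solCore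
  rw [hfd, hmod]
  dsimp only
  by_cases hodd : numbers.length % 2 = 1
  · have hlt : numbers.length / 2 < numbers.length := by omega
    rw [hodd]
    simp only [Nat.cast_one, beq_self_eq_true, if_true]
    rw [PySem.List.pyGet?_natCast, List.getElem?_eq_getElem hlt]
    dsimp only
    have hzip := solLoopA_eq_zip numbers (numbers.length / 2)
      [numbers[numbers.length / 2]] (by omega)
    rw [show ((numbers.length : Int)) - ((numbers.length / 2 : Nat) : Int)
          = ((numbers.length / 2 : Nat) : Int) + 1 from by push_cast; omega] at hzip
    rw [hzip, List.getD_eq_getElem _ _ hlt]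
  · have hne : ¬ ((((numbers.length % 2 : Nat) : Int)) == 1) = true := by
      simp; omega
    rw [if_neg hne, if_neg hodd]
    have hzip := solLoopA_eq_zip numbers (numbers.length / 2) [] (by omega)
    rw [show ((numbers.length : Int)) - ((numbers.length / 2 : Nat) : Int)
          = ((numbers.length / 2 : Nat) : Int) from by push_cast; omega] at hzip
    simpa using hzip

/-- B's peel loop: the leftover list is the bare middle (or nothing) and the collected
    products are the innermost-first zip, reversed, after the accumulator. -/
lemma solPeelB_spec (numbers : List Int) (acc : List Int) :
    solPeelB numbers acc =
      ((if numbers.length % 2 = 1 then [numbers.getD (numbers.length / 2) 0] else []),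
       acc ++ (List.zipWith (· * ·) ((numbers.take (numbers.length / 2)).reverse)
                (numbers.drop (numbers.length - numbers.length / 2))).reverse) := by
  generalize hn : numbers.length = n
  induction n using Nat.strong_induction_on generalizing numbers acc with
  | _ n ih =>
  subst hn
  rw [solPeelB]
  by_cases h1 : 1 < numbers.length
  · rw [if_pos h1]
    -- numbers = a :: ys ++ [b]
    obtain ⟨a, t, rfl⟩ : ∃ a t, numbers = a :: t := by
      cases numbers with
      | nil => simp at h1
      | cons a t => exact ⟨a, t, rfl⟩
    have ht : t ≠ [] := by
      intro h; subst h; simp at h1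
    obtain ⟨ys, b, rfl⟩ : ∃ ys b, t = ys ++ [b] := ⟨t.dropLast, t.getLast ht, (t.dropLast_concat_getLast ht).symm⟩
    set xs := a :: (ys ++ [b]) with hxs
    have hget0 : PySem.List.pyGet? xs 0 = some a := PySem.List.pyGet?_zero_cons ..
    have hgetN : PySem.List.pyGet? xs (-1) = some b := by
      rw [PySem.List.pyGet?_neg_one, hxs, ← List.cons_append, List.getLast?_concat]
    have hslice : PySem.List.slice xs (some 1) (some (-1)) = ys := by
      rw [hxs]
      simp only [PySem.List.slice, PySem.List.clampIdx]
      norm_num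
      rw [if_neg (by omega : ¬((ys.length : Int) + 1 < 0))]
      simp
    rw [hget0, hgetN, hslice]
    dsimp only
    have hlen' : ys.length < xs.length := by simp [hxs]
    rw [ih ys.length hlen' ys _ rfl]
    set L := ys.length with hL
    have hlen : xs.length = L + 2 := by simp [hxs, hL]
    have hmod : xs.length % 2 = L % 2 := by omega
    have hdiv : xs.length / 2 = L / 2 + 1 := by omega
    have hk : L / 2 ≤ L := Nat.div_le_self ..
    have htake : xs.take (xs.length / 2) = a :: ys.take (L / 2) := by
      rw [hdiv, hxs]
      simp only [List.take_succ_cons]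
      rw [List.take_append_of_le_length hk]
    have hdropn : xs.length - xs.length / 2 = (L - L / 2) + 1 := by omega
    have hdrop : xs.drop (xs.length - xs.length / 2) = ys.drop (L - L / 2) ++ [b] := by
      rw [hdropn, hxs]
      simp only [List.drop_succ_cons]
      rw [List.drop_append_of_le_length (by omega)]
    have hlen2 : (ys.take (L / 2)).reverse.length = (ys.drop (L - L / 2)).length := by
      simp; omega
    have hzip : List.zipWith (· * ·) ((xs.take (xs.length / 2)).reverse)
        (xs.drop (xs.length - xs.length / 2))
        = List.zipWith (· * ·) ((ys.take (L / 2)).reverse) (ys.drop (L - L / 2)) ++ [a * b] := by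
      rw [htake, hdrop]
      simp only [List.reverse_cons]
      rw [List.zipWith_append hlen2]
      simp
    have hmid : (if xs.length % 2 = 1 then [xs.getD (xs.length / 2) 0] else [])
        = (if L % 2 = 1 then [ys.getD (L / 2) 0] else []) := by
      rw [hmod]
      by_cases hodd : L % 2 = 1
      · rw [if_pos hodd, if_pos hodd, hdiv, hxs]
        simp only [List.getD_cons_succ]
        have hlt : L / 2 < L := by omega
        simp [List.getD, List.getElem?_append_left hlt]
      · rw [if_neg hodd, if_neg hodd]
    rw [hzip, hmid]
    simp [List.reverse_append]
  · rw [if_neg h1]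
    have h1' : numbers.length ≤ 1 := by omega
    match numbers, h1' with
    | [], _ => simp
    | [a], _ => simp

/-- B computes the closed form. -/
lemma solution_alt_eq_core (numbers : List Int) : solution_alt numbers = solCore numbers := by
  unfold solution_alt solCore
  rw [solPeelB_spec]
  simp

-- ===== VERDICT (by name: the statement is the Claim_ definition above) =====
theorem solution_spec : Claim_equal_solution := by
  intro numbers _
  unfold Spec_solution
  rw [solution_eq_core, solution_alt_eq_core]
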